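-- pv_equiv track=rewrite | github.com/frostming/marko | marko/helpers.py | partition_by_spaces
-- ===== SOURCE A (Python) =====
-- def partition_by_spaces(text: str, spaces: str = " \t") -> tuple[str, str, str]:
--     """Split the given text by spaces or tabs, and return a tuple of
--     (start, delimiter, remaining). If spaces are not found, the latter
--     two elements will be empty.
--     """
--     start = end = -1
--     for i, c in enumerate(text):
--         if c in spaces:
--             if start >= 0:
--                 continue
--             start = i
--         elif start >= 0:
--             end = i
--             break
--     if start < 0:
--         return text, "", ""
--     if end < 0:
--         return text[:start], text[start:], ""
--     return text[:start], text[start:end], text[end:]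
-- ===== SOURCE B (Python) =====
-- def partition_by_spaces(text: str, spaces: str = " \t") -> tuple[str, str, str]:
--     """Split the given text by spaces or tabs, and return a tuple of
--     (start, delimiter, remaining). A three-state automaton distributes
--     every character into one of three output buckets; no indices or
--     slicing are ever computed."""
--     buckets = ([], [], [])
--     state = 0
--     for c in text:
--         is_sp = c in spaces
--         if state == 0 and is_sp:
--             state = 1
--         elif state == 1 and not is_sp:
--             state = 2
--         buckets[state].append(c)
--     return ("".join(buckets[0]), "".join(buckets[1]), "".join(buckets[2]))
-- ===== Notes on version B (the rewrite author's own statement) =====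
-- stated objective: alternative
-- what changed: Replaces A's index bookkeeping (start/end positions found by a flagged scan, then three slices of the original string) by a three-state automaton that distributes each character directly into one of three output buckets, so no index and no slice is ever computed.
import Mathlib
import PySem

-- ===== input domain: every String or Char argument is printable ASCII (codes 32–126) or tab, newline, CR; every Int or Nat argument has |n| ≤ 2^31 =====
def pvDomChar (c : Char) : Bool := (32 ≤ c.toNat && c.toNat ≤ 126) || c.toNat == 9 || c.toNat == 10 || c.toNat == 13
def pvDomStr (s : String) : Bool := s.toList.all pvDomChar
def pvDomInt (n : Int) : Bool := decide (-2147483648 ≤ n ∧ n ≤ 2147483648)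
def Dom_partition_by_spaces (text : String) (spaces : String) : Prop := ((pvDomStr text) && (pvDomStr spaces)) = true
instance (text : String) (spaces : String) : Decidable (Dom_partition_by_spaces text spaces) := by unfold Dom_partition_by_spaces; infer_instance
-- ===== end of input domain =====

-- B replaces A's index bookkeeping (start/end found by a flagged scan, then slicing) by a
-- three-state automaton that distributes each character into one of three output buckets;
-- objective: alternative (no index or slice is ever computed).

-- ===== PORT A =====
-- the for-loop of A: `i` is the enumerate counter, `start` the Int flag; the loop
-- breaks (returning `end = i`) at the first non-space seen after start was set.
def pbsLoopA (sp : List Char) : List Char → Nat → Int → Int × Int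
  | [], _, start => (start, -1)
  | c :: rest, i, start =>
    if PySem.Chars.isIn [c] sp then      -- `c in spaces` (single char ⇒ substring = member)
      if 0 ≤ start then pbsLoopA sp rest (i + 1) start
      else pbsLoopA sp rest (i + 1) (i : Int)
    else if 0 ≤ start then (start, (i : Int))
    else pbsLoopA sp rest (i + 1) start

def partition_by_spaces (text : String) (spaces : String) : String × String × String :=
  let l := text.toList
  let r := pbsLoopA spaces.toList l 0 (-1)
  if r.1 < 0 then (text, "", "")
  else if r.2 < 0 then
    (String.ofList (PySem.List.slice l none (some r.1)),
     String.ofList (PySem.List.slice l (some r.1) none), "")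
  else
    (String.ofList (PySem.List.slice l none (some r.1)),
     String.ofList (PySem.List.slice l (some r.1) (some r.2)),
     String.ofList (PySem.List.slice l (some r.2) none))

-- ===== PORT B =====
-- Source B's loop: `st` is the automaton state (0 = before, 1 = in the space run, 2 = after);
-- each character is appended to the bucket named by the updated state.
def pbsGo (sp : List Char) : List Char → Nat → List Char → List Char → List Char → List Char × List Char × List Char
  | [], _, b0, b1, b2 => (b0, b1, b2)
  | c :: rest, st, b0, b1, b2 =>
    let isSp := PySem.Chars.isIn [c] sp
    let st' := if st == 0 && isSp then 1 else if st == 1 && !isSp then 2 else st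
    if st' == 0 then pbsGo sp rest st' (b0 ++ [c]) b1 b2
    else if st' == 1 then pbsGo sp rest st' b0 (b1 ++ [c]) b2
    else pbsGo sp rest st' b0 b1 (b2 ++ [c])

def partition_by_spaces_alt (text : String) (spaces : String) : String × String × String :=
  let r := pbsGo spaces.toList text.toList 0 [] [] []
  (String.ofList r.1, String.ofList r.2.1, String.ofList r.2.2)

-- ===== PRECONDITION & SPEC =====
def Spec_partition_by_spaces (text : String) (spaces : String) (out : String × String × String) : Prop := out = partition_by_spaces_alt text spaces
instance (text : String) (spaces : String) (out : String × String × String) : Decidable (Spec_partition_by_spaces text spaces out) := by unfold Spec_partition_by_spaces; infer_instance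

-- ===== CLAIM (what is proved, stated in full; the proofs are below) =====
def Claim_equal_partition_by_spaces : Prop := ∀ (text : String) (spaces : String), Dom_partition_by_spaces text spaces → Spec_partition_by_spaces text spaces (partition_by_spaces text spaces)

-- ===== LEMMAS AND PROOFS =====

-- A's loop once start ≥ 0 is set: start is frozen, end is the first non-space index (or -1)
lemma loopA_after (sp : List Char) :
    ∀ (l : List Char) (i : Nat) (s : Int), 0 ≤ s →
      pbsLoopA sp l i s =
        (s, if l.dropWhile (fun c => PySem.Chars.isIn [c] sp) = [] then -1
            else ((i + (l.takeWhile (fun c => PySem.Chars.isIn [c] sp)).length : Nat) : Int)) := by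
  intro l
  induction l with
  | nil => intro i s hs; simp [pbsLoopA]
  | cons c rest ih =>
    intro i s hs
    by_cases h : PySem.Chars.isIn [c] sp
    · have h1 : pbsLoopA sp (c :: rest) i s = pbsLoopA sp rest (i + 1) s := by
        simp [pbsLoopA, h, hs]
      rw [h1, ih (i + 1) s hs]
      simp only [List.takeWhile_cons, List.dropWhile_cons, h, if_true, List.length_cons,
        Prod.mk.injEq, true_and]
      split_ifs with hp
      · rfl
      · push_cast; ring
    · simp [pbsLoopA, h, hs]

-- A's loop before start is set, characterised by takeWhile/dropWhile on "not a space"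
lemma loopA_before (sp : List Char) :
    ∀ (l : List Char) (i : Nat),
      pbsLoopA sp l i (-1) =
        (match l.dropWhile (fun c => !PySem.Chars.isIn [c] sp) with
         | [] => ((-1 : Int), (-1 : Int))
         | _ :: rest =>
             (((i + (l.takeWhile (fun c => !PySem.Chars.isIn [c] sp)).length : Nat) : Int),
              if rest.dropWhile (fun c => PySem.Chars.isIn [c] sp) = [] then -1
              else ((i + (l.takeWhile (fun c => !PySem.Chars.isIn [c] sp)).length + 1
                     + (rest.takeWhile (fun c => PySem.Chars.isIn [c] sp)).length : Nat) : Int))) := by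
  intro l
  induction l with
  | nil => intro i; simp [pbsLoopA]
  | cons c rest ih =>
    intro i
    by_cases h : PySem.Chars.isIn [c] sp
    · have h1 : pbsLoopA sp (c :: rest) i (-1) = pbsLoopA sp rest (i + 1) (i : Int) := by
        simp [pbsLoopA, h]
      rw [h1, loopA_after sp rest (i + 1) (i : Int) (by positivity)]
      have hne : (!PySem.Chars.isIn [c] sp) = false := by simp [h]
      simp only [List.takeWhile_cons, List.dropWhile_cons, hne, Bool.false_eq_true, if_false,
        List.length_nil, Nat.add_zero]
    · have h1 : pbsLoopA sp (c :: rest) i (-1) = pbsLoopA sp rest (i + 1) (-1) := by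
        simp [pbsLoopA, h]
      rw [h1, ih (i + 1)]
      have hne : (!PySem.Chars.isIn [c] sp) = true := by simp [h]
      simp only [List.takeWhile_cons, List.dropWhile_cons, hne, if_true, List.length_cons]
      cases rest.dropWhile (fun c => !PySem.Chars.isIn [c] sp) with
      | nil => rfl
      | cons d ds =>
        simp only [Prod.mk.injEq]
        refine ⟨by push_cast; ring, ?_⟩
        split_ifs
        · rfl
        · push_cast; ring

-- B's automaton in state 2: every remaining character goes to the third bucket
lemma go_state2 (sp : List Char) :
    ∀ (l b0 b1 b2 : List Char), pbsGo sp l 2 b0 b1 b2 = (b0, b1, b2 ++ l) := by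
  intro l
  induction l with
  | nil => intro b0 b1 b2; simp [pbsGo]
  | cons c rest ih => intro b0 b1 b2; simp [pbsGo, ih]

-- B's automaton in state 1: the space run extends the second bucket, the rest the third
lemma go_state1 (sp : List Char) :
    ∀ (l b0 b1 b2 : List Char),
      pbsGo sp l 1 b0 b1 b2 =
        (b0, b1 ++ l.takeWhile (fun c => PySem.Chars.isIn [c] sp),
         b2 ++ l.dropWhile (fun c => PySem.Chars.isIn [c] sp)) := by
  intro l
  induction l with
  | nil => intro b0 b1 b2; simp [pbsGo]
  | cons c rest ih =>
    intro b0 b1 b2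
    by_cases h : PySem.Chars.isIn [c] sp
    · simp [pbsGo, h, ih]
    · simp [pbsGo, h, go_state2]

-- B's automaton from state 0, characterised by the same takeWhile/dropWhile decomposition
lemma go_state0 (sp : List Char) :
    ∀ (l b0 b1 b2 : List Char),
      pbsGo sp l 0 b0 b1 b2 =
        (match l.dropWhile (fun c => !PySem.Chars.isIn [c] sp) with
         | [] => (b0 ++ l, b1, b2)
         | c :: rest =>
             (b0 ++ l.takeWhile (fun c => !PySem.Chars.isIn [c] sp),
              b1 ++ c :: rest.takeWhile (fun c => PySem.Chars.isIn [c] sp),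
              b2 ++ rest.dropWhile (fun c => PySem.Chars.isIn [c] sp))) := by
  intro l
  induction l with
  | nil => intro b0 b1 b2; simp [pbsGo]
  | cons c rest ih =>
    intro b0 b1 b2
    by_cases h : PySem.Chars.isIn [c] sp
    · simp [pbsGo, h, go_state1]
    · rw [show pbsGo sp (c :: rest) 0 b0 b1 b2 = pbsGo sp rest 0 (b0 ++ [c]) b1 b2 by
        simp [pbsGo, h], ih]
      simp only [List.takeWhile_cons, List.dropWhile_cons, h]
      cases rest.dropWhile (fun c => !PySem.Chars.isIn [c] sp) with
      | nil => simp
      | cons d ds => simp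

-- drop/take at the takeWhile boundary (facts specific to the shared decomposition)
lemma drop_len_takeWhile (p : Char → Bool) (l : List Char) :
    l.drop (l.takeWhile p).length = l.dropWhile p := by
  induction l with
  | nil => simp
  | cons c rest ih => by_cases h : p c <;> simp [h, ih]

lemma take_len_takeWhile (p : Char → Bool) (l : List Char) :
    l.take (l.takeWhile p).length = l.takeWhile p := by
  induction l with
  | nil => simp
  | cons c rest ih => by_cases h : p c <;> simp [h, ih]

theorem partition_by_spaces_spec : Claim_equal_partition_by_spaces := by
  intro text spaces _
  unfold Spec_partition_by_spaces partition_by_spaces partition_by_spaces_alt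
  simp only [loopA_before, go_state0]
  cases hd : text.toList.dropWhile (fun c => !PySem.Chars.isIn [c] spaces.toList) with
  | nil => simp [hd]
  | cons c rest =>
    simp only [hd]
    have hpre := take_len_takeWhile (fun c => !PySem.Chars.isIn [c] spaces.toList) text.toList
    have hdrop : text.toList.drop
        (text.toList.takeWhile (fun c => !PySem.Chars.isIn [c] spaces.toList)).length
        = c :: rest := by
      rw [drop_len_takeWhile, hd]
    have hrest := take_len_takeWhile (fun c => PySem.Chars.isIn [c] spaces.toList) rest
    have hrdrop := drop_len_takeWhile (fun c => PySem.Chars.isIn [c] spaces.toList) rest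
    cases hrd : rest.dropWhile (fun c => PySem.Chars.isIn [c] spaces.toList) with
    | nil =>
      have hrtw : rest.takeWhile (fun c => PySem.Chars.isIn [c] spaces.toList) = rest := by
        have := List.takeWhile_append_dropWhile
          (p := fun c => PySem.Chars.isIn [c] spaces.toList) (l := rest)
        rw [hrd, List.append_nil] at this; exact this
      simp [PySem.List.slice_to_natCast, PySem.List.slice_from_natCast, hpre, hdrop, hrtw]
    | cons d ds =>
      have harith : (text.toList.takeWhile (fun c => !PySem.Chars.isIn [c] spaces.toList)).length + 1
            + (rest.takeWhile (fun c => PySem.Chars.isIn [c] spaces.toList)).length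
            - (text.toList.takeWhile (fun c => !PySem.Chars.isIn [c] spaces.toList)).length
          = 1 + (rest.takeWhile (fun c => PySem.Chars.isIn [c] spaces.toList)).length := by omega
      have hdropE : text.toList.drop
            ((text.toList.takeWhile (fun c => !PySem.Chars.isIn [c] spaces.toList)).length + 1
             + (rest.takeWhile (fun c => PySem.Chars.isIn [c] spaces.toList)).length)
          = rest.dropWhile (fun c => PySem.Chars.isIn [c] spaces.toList) := by
        rw [show (text.toList.takeWhile (fun c => !PySem.Chars.isIn [c] spaces.toList)).length + 1
             + (rest.takeWhile (fun c => PySem.Chars.isIn [c] spaces.toList)).length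
           = (text.toList.takeWhile (fun c => !PySem.Chars.isIn [c] spaces.toList)).length
             + (1 + (rest.takeWhile (fun c => PySem.Chars.isIn [c] spaces.toList)).length) by omega,
           ← List.drop_drop, hdrop, Nat.add_comm 1]
        simpa [List.drop_succ_cons] using hrdrop
      have hmid : List.take
            (1 + (rest.takeWhile (fun c => PySem.Chars.isIn [c] spaces.toList)).length) (c :: rest)
          = c :: rest.takeWhile (fun c => PySem.Chars.isIn [c] spaces.toList) := by
        rw [Nat.add_comm, List.take_succ_cons, hrest]
      simp only [Nat.zero_add]
      rw [if_neg (List.cons_ne_nil _ _)]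
      rw [if_neg (show ¬((((text.toList.takeWhile (fun c => !PySem.Chars.isIn [c] spaces.toList)).length : Nat) : Int) < 0) by omega)]
      rw [if_neg (show ¬((((text.toList.takeWhile (fun c => !PySem.Chars.isIn [c] spaces.toList)).length
            + 1 + (rest.takeWhile (fun c => PySem.Chars.isIn [c] spaces.toList)).length : Nat) : Int) < 0) by omega)]
      rw [PySem.List.slice_to_natCast, PySem.List.slice_natCast, PySem.List.slice_from_natCast]
      rw [hpre, harith, hdrop, hdropE, hrd, hmid]
      simp
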